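-- pv_equiv track=rewrite | github.com/thomasc23/forts_scraper | geocoder.py | get_confidence_from_google_types
-- ===== SOURCE A (Python) =====
-- GOOGLE_TYPE_CONFIDENCE = {
--     # High confidence - specific location
--     "premise": "exact",
--     "subpremise": "exact",
--     "street_address": "exact",
--     "route": "exact",
--     "intersection": "exact",
--     "point_of_interest": "exact",
--     "park": "exact",
--     "airport": "exact",
--     "establishment": "exact",
--
--     # Medium confidence - locality level
--     "locality": "locality",
--     "sublocality": "locality",
--     "sublocality_level_1": "locality",
--     "neighborhood": "locality",
--     "postal_code": "locality",
--
--     # Lower confidence - administrative areas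
--     "administrative_area_level_2": "county",
--     "administrative_area_level_1": "state",
--     "country": "state",
-- }
--
-- def get_confidence_from_google_types(types: list, is_approximate: bool) -> str:
--     """
--     Determine confidence level from Google's result types.
--
--     Args:
--         types: List of result types from Google API
--         is_approximate: Whether the original location had "near" prefix
--     """
--     confidence = "state"  # default to lowest
--
--     for result_type in types:
--         if result_type in GOOGLE_TYPE_CONFIDENCE:
--             type_confidence = GOOGLE_TYPE_CONFIDENCE[result_type]
--             # Upgrade confidence if this type is more specific
--             if type_confidence == "exact":
--                 confidence = "approximate" if is_approximate else "exact"
--                 break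
--             elif type_confidence == "locality" and confidence in ("county", "state"):
--                 confidence = "approximate" if is_approximate else "locality"
--             elif type_confidence == "county" and confidence == "state":
--                 confidence = "county"
--
--     return confidence
-- ===== SOURCE B (Python) =====
-- GOOGLE_TYPE_CONFIDENCE = {
--     "premise": "exact",
--     "subpremise": "exact",
--     "street_address": "exact",
--     "route": "exact",
--     "intersection": "exact",
--     "point_of_interest": "exact",
--     "park": "exact",
--     "airport": "exact",
--     "establishment": "exact",
--     "locality": "locality",
--     "sublocality": "locality",
--     "sublocality_level_1": "locality",
--     "neighborhood": "locality",
--     "postal_code": "locality",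
--     "administrative_area_level_2": "county",
--     "administrative_area_level_1": "state",
--     "country": "state",
-- }
--
-- _PRIORITY = {"state": 0, "county": 1, "locality": 2, "exact": 3}
-- _BY_LEVEL = ["state", "county", "locality", "exact"]
--
--
-- def get_confidence_from_google_types(types: list, is_approximate: bool) -> str:
--     # Highest-priority confidence category among recognized types (order-independent).
--     best = max(
--         (_PRIORITY[GOOGLE_TYPE_CONFIDENCE[t]] for t in types if t in GOOGLE_TYPE_CONFIDENCE),
--         default=0,
--     )
--     cat = _BY_LEVEL[best]
--     if cat in ("exact", "locality") and is_approximate: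
--         return "approximate"
--     return cat
-- ===== Notes on version B (the rewrite author's own statement) =====
-- stated objective: simpler
-- what changed: Replaces A's stateful confidence-upgrade loop with early break by an order-independent maximum of per-type priorities (a comprehension plus max with a default), mapping the single winning category to the output string in one place.
import Mathlib
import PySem

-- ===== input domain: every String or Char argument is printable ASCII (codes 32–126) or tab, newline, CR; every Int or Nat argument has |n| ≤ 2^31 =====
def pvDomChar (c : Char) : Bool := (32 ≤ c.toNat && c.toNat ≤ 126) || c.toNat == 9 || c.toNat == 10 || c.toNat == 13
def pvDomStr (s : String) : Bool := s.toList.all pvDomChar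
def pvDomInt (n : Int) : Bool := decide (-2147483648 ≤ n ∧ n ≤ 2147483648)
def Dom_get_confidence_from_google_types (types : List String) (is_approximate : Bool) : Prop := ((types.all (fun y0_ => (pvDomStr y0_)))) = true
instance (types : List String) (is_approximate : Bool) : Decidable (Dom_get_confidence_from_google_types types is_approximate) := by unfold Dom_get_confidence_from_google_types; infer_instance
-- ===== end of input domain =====

-- B replaces A's stateful upgrade loop (with an early break) by an order-independent
-- maximum over a priority table, mapped to the output string in one place (objective: simpler).

def GOOGLE_TYPE_CONFIDENCE : PySem.Dict String String := PySem.Dict.mk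
  [("premise", "exact"), ("subpremise", "exact"), ("street_address", "exact"),
   ("route", "exact"), ("intersection", "exact"), ("point_of_interest", "exact"),
   ("park", "exact"), ("airport", "exact"), ("establishment", "exact"),
   ("locality", "locality"), ("sublocality", "locality"), ("sublocality_level_1", "locality"),
   ("neighborhood", "locality"), ("postal_code", "locality"),
   ("administrative_area_level_2", "county"),
   ("administrative_area_level_1", "state"), ("country", "state")]

-- ===== PORT A =====
-- the 'for result_type in types' loop; an "exact" hit returns immediately (Python's break)
def googleLoopA (ia : Bool) : List String → String → String
  | [], conf => conf
  | t :: rest, conf =>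
    match PySem.Dict.get? GOOGLE_TYPE_CONFIDENCE t with
    | some tc =>
      if tc == "exact" then (if ia then "approximate" else "exact")
      else if tc == "locality" && (conf == "county" || conf == "state") then
        googleLoopA ia rest (if ia then "approximate" else "locality")
      else if tc == "county" && conf == "state" then
        googleLoopA ia rest "county"
      else googleLoopA ia rest conf
    | none => googleLoopA ia rest conf

def get_confidence_from_google_types (types : List String) (is_approximate : Bool) : String :=
  googleLoopA is_approximate types "state"

-- ===== PORT B =====
def PRIORITY : PySem.Dict String Nat := PySem.Dict.mk
  [("state", 0), ("county", 1), ("locality", 2), ("exact", 3)]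

def BY_LEVEL : List String := ["state", "county", "locality", "exact"]

def get_confidence_from_google_types_alt (types : List String) (is_approximate : Bool) : String :=
  -- max((_PRIORITY[GOOGLE_TYPE_CONFIDENCE[t]] for t in types if t in GOOGLE_TYPE_CONFIDENCE), default=0)
  -- (the _PRIORITY lookup always hits: every GOOGLE_TYPE_CONFIDENCE value is a _PRIORITY key)
  let best := PySem.List.maxD
    (types.filterMap (fun t =>
      (PySem.Dict.get? GOOGLE_TYPE_CONFIDENCE t).map (fun c => PySem.Dict.getD PRIORITY c 0)))
    (fun x => x) 0
  let cat := PySem.List.pyGetD BY_LEVEL (best : Int) "state"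
  if (cat == "exact" || cat == "locality") && is_approximate then "approximate" else cat

-- ===== PRECONDITION & SPEC =====
def Spec_get_confidence_from_google_types (types : List String) (is_approximate : Bool) (out : String) : Prop := out = get_confidence_from_google_types_alt types is_approximate
instance (types : List String) (is_approximate : Bool) (out : String) : Decidable (Spec_get_confidence_from_google_types types is_approximate out) := by unfold Spec_get_confidence_from_google_types; infer_instance

-- ===== CLAIM (what is proved, stated in full; the proofs are below) =====
def Claim_equal_get_confidence_from_google_types : Prop := ∀ (types : List String) (is_approximate : Bool), Dom_get_confidence_from_google_types types is_approximate → Spec_get_confidence_from_google_types types is_approximate (get_confidence_from_google_types types is_approximate)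

-- ===== LEMMAS AND PROOFS =====

-- the confidence string of A's loop state, as a function of its priority level
def render (ia : Bool) : Nat → String
  | 0 => "state"
  | 1 => "county"
  | 2 => if ia then "approximate" else "locality"
  | _ => if ia then "approximate" else "exact"

-- priority of the category a recognized type maps to (B's generator element)
def prioOf (t : String) : Option Nat :=
  (PySem.Dict.get? GOOGLE_TYPE_CONFIDENCE t).map (fun c => PySem.Dict.getD PRIORITY c 0)

def bestFold (types : List String) : Nat :=
  (types.filterMap prioOf).foldl max 0

lemma gtc_cases (t : String) :
    PySem.Dict.get? GOOGLE_TYPE_CONFIDENCE t = none ∨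
    PySem.Dict.get? GOOGLE_TYPE_CONFIDENCE t = some "exact" ∨
    PySem.Dict.get? GOOGLE_TYPE_CONFIDENCE t = some "locality" ∨
    PySem.Dict.get? GOOGLE_TYPE_CONFIDENCE t = some "county" ∨
    PySem.Dict.get? GOOGLE_TYPE_CONFIDENCE t = some "state" := by
  cases h : List.find? (fun p => p.1 == t) GOOGLE_TYPE_CONFIDENCE.items with
  | none => left; simp [PySem.Dict.get?, h]
  | some p =>
    have hm := List.mem_of_find?_eq_some h
    right
    simp only [GOOGLE_TYPE_CONFIDENCE] at hm
    fin_cases hm <;> simp [PySem.Dict.get?, h]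

lemma foldl_max_shift (ps : List Nat) (a : Nat) :
    ps.foldl max a = max a (ps.foldl max 0) := by
  induction ps generalizing a with
  | nil => simp
  | cons p ps ih =>
    simp only [List.foldl]
    rw [ih (max a p), ih (max 0 p)]
    omega

lemma bestFold_cons_none {t : String} (rest : List String) (h : prioOf t = none) :
    bestFold (t :: rest) = bestFold rest := by
  simp [bestFold, h]

lemma bestFold_cons_some {t : String} {p : Nat} (rest : List String) (h : prioOf t = some p) :
    bestFold (t :: rest) = max p (bestFold rest) := by
  simp only [bestFold, List.filterMap_cons, h, List.foldl]
  rw [foldl_max_shift]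
  simp

lemma prio_exact : PySem.Dict.getD PRIORITY "exact" 0 = 3 := by decide
lemma prio_locality : PySem.Dict.getD PRIORITY "locality" 0 = 2 := by decide
lemma prio_county : PySem.Dict.getD PRIORITY "county" 0 = 1 := by decide
lemma prio_state : PySem.Dict.getD PRIORITY "state" 0 = 0 := by decide

lemma bestFold_le3 (types : List String) : bestFold types ≤ 3 := by
  induction types with
  | nil => simp [bestFold]
  | cons t rest ih =>
    rcases gtc_cases t with h | h | h | h | h
    · rw [bestFold_cons_none rest (by simp [prioOf, h])]; exact ih
    · rw [bestFold_cons_some (p := 3) rest (by simp [prioOf, h, prio_exact])]; omega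
    · rw [bestFold_cons_some (p := 2) rest (by simp [prioOf, h, prio_locality])]; omega
    · rw [bestFold_cons_some (p := 1) rest (by simp [prioOf, h, prio_county])]; omega
    · rw [bestFold_cons_some (p := 0) rest (by simp [prioOf, h, prio_state])]; omega

lemma render_zero (ia : Bool) : render ia 0 = "state" := rfl
lemma render_one (ia : Bool) : render ia 1 = "county" := rfl
lemma render_two (ia : Bool) : render ia 2 = if ia then "approximate" else "locality" := rfl

lemma render_of_ge3 (ia : Bool) (n : Nat) (h : 3 ≤ n) :
    render ia n = if ia then "approximate" else "exact" := by
  obtain ⟨m, rfl⟩ : ∃ m, n = m + 3 := ⟨n - 3, by omega⟩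
  rfl

lemma loop_render (ia : Bool) (types : List String) (l : Nat) (hl : l ≤ 2) :
    googleLoopA ia types (render ia l) = render ia (max l (bestFold types)) := by
  induction types generalizing l with
  | nil => simp [googleLoopA, bestFold]
  | cons t rest ih =>
    have hb3 := bestFold_le3 rest
    rcases gtc_cases t with h | h | h | h | h
    · rw [bestFold_cons_none rest (by simp [prioOf, h])]
      simp only [googleLoopA, h]
      exact ih l hl
    · rw [bestFold_cons_some (p := 3) rest (by simp [prioOf, h, prio_exact])]
      rw [render_of_ge3 ia (max l (max 3 (bestFold rest))) (by omega)]
      cases ia <;> simp [googleLoopA, h]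
    · rw [bestFold_cons_some (p := 2) rest (by simp [prioOf, h, prio_locality])]
      interval_cases l <;> cases ia <;>
        simp only [googleLoopA, h, render_zero, render_one, render_two, if_true, if_false,
          Bool.false_eq_true, String.reduceBEq, String.reduceEq, Bool.or_self, Bool.or_true,
          Bool.true_or, Bool.false_or, Bool.and_true, Bool.and_false, Bool.true_and,
          Bool.false_and, Bool.or_false, ite_true, ite_false, cond_true, cond_false] <;>
        first
          | (rw [show googleLoopA false rest "locality" = googleLoopA false rest (render false 2) from rfl,
                 ih 2 (by omega)]; congr 1 <;> omega)
          | (rw [show googleLoopA true rest "approximate" = googleLoopA true rest (render true 2) from rfl,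
                 ih 2 (by omega)]; congr 1 <;> omega)
    · rw [bestFold_cons_some (p := 1) rest (by simp [prioOf, h, prio_county])]
      interval_cases l <;> cases ia <;>
        simp only [googleLoopA, h, render_zero, render_one, render_two, if_true, if_false,
          Bool.false_eq_true, String.reduceBEq, String.reduceEq, Bool.or_self, Bool.or_true,
          Bool.true_or, Bool.false_or, Bool.and_true, Bool.and_false, Bool.true_and,
          Bool.false_and, Bool.or_false, ite_true, ite_false, cond_true, cond_false] <;>
        first
          | (rw [show ("county" : String) = render false 1 from rfl, ih 1 (by omega)]; congr 1 <;> omega)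
          | (rw [show ("county" : String) = render true 1 from rfl, ih 1 (by omega)]; congr 1 <;> omega)
          | (rw [show ("approximate" : String) = render true 2 from rfl, ih 2 (by omega)]; congr 1 <;> omega)
          | (rw [show ("locality" : String) = render false 2 from rfl, ih 2 (by omega)]; congr 1 <;> omega)
    · rw [bestFold_cons_some (p := 0) rest (by simp [prioOf, h, prio_state])]
      interval_cases l <;> cases ia <;>
        simp only [googleLoopA, h, render_zero, render_one, render_two, if_true, if_false,
          Bool.false_eq_true, String.reduceBEq, String.reduceEq, Bool.or_self, Bool.or_true,
          Bool.true_or, Bool.false_or, Bool.and_true, Bool.and_false, Bool.true_and,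
          Bool.false_and, Bool.or_false, ite_true, ite_false, cond_true, cond_false] <;>
        first
          | (rw [show ("state" : String) = render false 0 from rfl, ih 0 (by omega)]; congr 1 <;> omega)
          | (rw [show ("state" : String) = render true 0 from rfl, ih 0 (by omega)]; congr 1 <;> omega)
          | (rw [show ("county" : String) = render false 1 from rfl, ih 1 (by omega)]; congr 1 <;> omega)
          | (rw [show ("county" : String) = render true 1 from rfl, ih 1 (by omega)]; congr 1 <;> omega)
          | (rw [show ("approximate" : String) = render true 2 from rfl, ih 2 (by omega)]; congr 1 <;> omega)
          | (rw [show ("locality" : String) = render false 2 from rfl, ih 2 (by omega)]; congr 1 <;> omega)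

lemma alt_eq_render (types : List String) (ia : Bool) :
    get_confidence_from_google_types_alt types ia = render ia (bestFold types) := by
  have hb := bestFold_le3 types
  have hmax : PySem.List.maxD (types.filterMap prioOf) (fun x => x) 0 = bestFold types := by
    cases h : types.filterMap prioOf with
    | nil => simp [PySem.List.maxD, h, bestFold, PySem.List.max?]
    | cons p ps =>
      simp only [PySem.List.maxD, PySem.List.max?_id_cons, h, Option.getD, bestFold, List.foldl]
      rw [foldl_max_shift ps (max 0 p), foldl_max_shift ps p]
      omega
  unfold get_confidence_from_google_types_alt
  rw [show (fun t => (PySem.Dict.get? GOOGLE_TYPE_CONFIDENCE t).map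
      (fun c => PySem.Dict.getD PRIORITY c 0)) = prioOf from rfl, hmax]
  set b := bestFold types with hbdef
  interval_cases b <;> cases ia <;>
    simp [BY_LEVEL, render, PySem.List.pyGetD]

-- ===== VERDICT (by name: the statement is the Claim_ definition above) =====
theorem get_confidence_from_google_types_spec : Claim_equal_get_confidence_from_google_types := by
  intro types ia _
  unfold Spec_get_confidence_from_google_types
  rw [alt_eq_render]
  have h := loop_render ia types 0 (by omega)
  simpa [render, get_confidence_from_google_types] using h
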